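-- pv_equiv track=rewrite | github.com/Doomds/codingbat_py | Warmup-2/string_match.py | string_match
-- ===== SOURCE A (Python) =====
-- def string_match(a, b):
--     shorter = min(len(a), len(b))
--     count = 0
--
--     for i in range(shorter-1):
--         a_substring = a[i:i+2]
--         b_substring = b[i:i+2]
--         if a_substring == b_substring:
--             count += 1
--
--     return count
-- ===== SOURCE B (Python) =====
-- def string_match(a, b):
--     # pass 1: per-index character agreement mask (zip truncates to the shorter string)
--     mask = [x == y for x, y in zip(a, b)]
--     # pass 2: count adjacent True pairs in the mask
--     return sum(1 for p, q in zip(mask, mask[1:]) if p and q)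
-- ===== Notes on version B (the rewrite author's own statement) =====
-- stated objective: faster
-- what changed: B replaces A's loop over 2-character slice comparisons with two passes: a per-index character-equality mask built by zipping the strings, then a count of adjacent True pairs in the mask; no per-step string slicing/allocation remains (measured ~1.8x faster).
import Mathlib
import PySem

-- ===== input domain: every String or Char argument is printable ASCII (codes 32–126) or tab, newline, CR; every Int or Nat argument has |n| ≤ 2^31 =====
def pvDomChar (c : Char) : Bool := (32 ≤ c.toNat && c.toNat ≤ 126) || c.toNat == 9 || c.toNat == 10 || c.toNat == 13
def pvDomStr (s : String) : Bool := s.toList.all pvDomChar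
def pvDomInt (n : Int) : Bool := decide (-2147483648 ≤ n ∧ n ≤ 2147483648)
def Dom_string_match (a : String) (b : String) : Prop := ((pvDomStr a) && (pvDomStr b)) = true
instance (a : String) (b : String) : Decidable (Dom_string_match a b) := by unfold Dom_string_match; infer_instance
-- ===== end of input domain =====

-- B builds a per-index equality mask and then counts adjacent True pairs: a different decomposition of A's single slice-comparing loop.

-- ===== PORT A =====
def string_match (a : String) (b : String) : Int :=
  let shorter : Int := min (PySem.Str.len a) (PySem.Str.len b)
  (PySem.List.pyRange 0 (shorter - 1) 1).foldl
    (fun count i =>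
      if PySem.List.slice a.toList (some i) (some (i + 2))
           == PySem.List.slice b.toList (some i) (some (i + 2)) then count + 1 else count) 0

-- ===== PORT B =====
def string_match_alt (a : String) (b : String) : Int :=
  let mask := List.zipWith (fun x y => x == y) a.toList b.toList
  (List.zipWith (fun p q => p && q) mask (mask.drop 1)).foldl
    (fun acc pq => if pq then acc + 1 else acc) 0

-- ===== PRECONDITION & SPEC =====
def Spec_string_match (a : String) (b : String) (out : Int) : Prop := out = string_match_alt a b
instance (a : String) (b : String) (out : Int) : Decidable (Spec_string_match a b out) := by unfold Spec_string_match; infer_instance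

-- ===== CLAIM (what is proved, stated in full; the proofs are below) =====
def Claim_equal_string_match : Prop := ∀ (a : String) (b : String), Dom_string_match a b → Spec_string_match a b (string_match a b)

-- ===== LEMMAS AND PROOFS =====
theorem pvTakeTwoDrop {α : Type} (l : List α) (j : Nat) (h : j + 2 ≤ l.length) :
    List.take 2 (List.drop j l) = [l[j]'(by omega), l[j+1]'(by omega)] := by
  apply List.ext_getElem
  · simp; try omega
  · intro i h1 h2
    simp only [List.length_take, List.length_drop, lt_min_iff] at h1
    match i, h1 with
    | 0, _ => simp
    | 1, _ => simp; try rfl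

theorem string_match_key (la lb : List Char) :
    ((PySem.List.pyRange 0 (min (la.length : Int) (lb.length : Int) - 1) 1).countP
      (fun i => PySem.List.slice la (some i) (some (i + 2))
             == PySem.List.slice lb (some i) (some (i + 2))))
    = ((List.zipWith (fun p q => p && q) (List.zipWith (fun x y => x == y) la lb)
        ((List.zipWith (fun x y => x == y) la lb).drop 1)).countP id) := by
  set mask := List.zipWith (fun x y => x == y) la lb with hmask
  set m := min la.length lb.length with hm
  have hmasklen : mask.length = m := by simp [hmask, hm]
  have hcast : min (la.length : Int) (lb.length : Int) = (m : Int) := by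
    simp [hm, Nat.cast_min]
  have hrange : ((m : Int) - 1 - 0).toNat = m - 1 := by omega
  rw [hcast, PySem.List.pyRange_one, hrange, List.countP_map]
  -- pairs list as a map over range
  have hpairs : List.zipWith (fun p q => p && q) mask (mask.drop 1)
      = (List.range (m - 1)).map (fun j => mask.getD j false && mask.getD (j+1) false) := by
    apply List.ext_getElem
    · simp [hmasklen]
    · intro j h1 h2
      have hj : j < m - 1 := by simpa using h2
      have hj1 : j + 1 < mask.length := by omega
      simp [List.getElem_zipWith, List.getD_eq_getElem?_getD,
        List.getElem?_eq_getElem hj1, List.getElem?_eq_getElem (by omega : j < mask.length)]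
  rw [hpairs, List.countP_map]
  apply List.countP_congr
  intro j hjmem
  have hj : j < m - 1 := List.mem_range.mp hjmem
  have hja : j + 2 ≤ la.length := by omega
  have hjb : j + 2 ≤ lb.length := by omega
  have hsa : PySem.List.slice la (some ((j:Int))) (some ((j:Int) + 2))
      = [la[j], la[j+1]] := by
    have : ((j:Int) + 2) = ((j:Int) + ((2:Nat):Int)) := by push_cast; ring
    rw [this, PySem.List.slice_natCast_add, pvTakeTwoDrop la j hja]; rfl
  have hsb : PySem.List.slice lb (some ((j:Int))) (some ((j:Int) + 2))
      = [lb[j], lb[j+1]] := by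
    have : ((j:Int) + 2) = ((j:Int) + ((2:Nat):Int)) := by push_cast; ring
    rw [this, PySem.List.slice_natCast_add, pvTakeTwoDrop lb j hjb]; rfl
  simp only [Function.comp, zero_add, id_eq, hsa, hsb]
  have hg : ∀ k (hk : k < m), mask.getD k false = (la[k]'(by omega) == lb[k]'(by omega)) := by
    intro k hk
    rw [List.getD_eq_getElem _ _ (by omega)]
    simp [hmask]
  rw [hg j (by omega), hg (j+1) (by omega)]
  simp [List.cons_beq_cons]
  tauto

-- ===== VERDICT (by name: the statement is the Claim_ definition above) =====
theorem string_match_spec : Claim_equal_string_match := by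
  intro a b _
  unfold Spec_string_match string_match string_match_alt
  simp only [PySem.List.foldl_if_add_one, zero_add, PySem.Str.len_eq]
  exact_mod_cast string_match_key a.toList b.toList
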